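-- pv_equiv track=rewrite | github.com/onetesseract/bio_prep | ppq/17/1.py | solve
-- ===== SOURCE A (Python) =====
-- def choose_letter(a, b):
--     if a == b: return a
--     if a == 'R':
--         if b == 'G': return 'B'
--         if b == 'B': return 'G'
--     if a == 'G':
--         if b == 'R': return 'B'
--         if b == 'B': return 'R'
--     if a == 'B':
--         if b == 'R': return 'G'
--         if b == 'G': return 'R'
--
-- def solve(starting_pos):
--     old_line = starting_pos
--     next_line = []
--     while len(old_line) != 1:
--         for i in range(len(old_line) - 1):
--             next_line.append(choose_letter(old_line[i], old_line[i + 1]))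
--
--         old_line = next_line
--         next_line = []
--
--     return old_line[0]
-- ===== SOURCE B (Python) =====
-- def c3(n, k):
--     # C(n, k) mod 3 by Lucas' theorem: product over base-3 digits.
--     r = 1
--     while k != 0:
--         ni, ki = n % 3, k % 3
--         if ki > ni:
--             return 0
--         if ki == 1 and ni == 2:
--             r = r * 2 % 3
--         n //= 3
--         k //= 3
--     return r
--
--
-- def solve(starting_pos):
--     if len(starting_pos) == 1:
--         return starting_pos
--     val = {'R': 0, 'G': 1, 'B': 2}
--     m = len(starting_pos) - 1
--     s = sum(c3(m, k) * val[c] for k, c in enumerate(starting_pos)) % 3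
--     if m % 2 == 1:
--         s = (3 - s) % 3
--     return 'RGB'[s]
-- ===== Notes on version B (the rewrite author's own statement) =====
-- stated objective: alternative
-- what changed: Replaces the pairwise-reduction triangle (repeated rows of choose_letter) by one pass summing C(n-1,k)*value(x_k) over GF(3), each binomial coefficient mod 3 computed from base-3 digits via Lucas' theorem; Pre_ excludes the empty string (A's loop never terminates) and length>=2 strings with a character outside RGB (A returns None, not a string).
-- outside the precondition, e.g. on solve('RX'): A returns None, B raises KeyError; on solve(''): A does not finish within the time limit, B returns 'R'
import Mathlib
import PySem

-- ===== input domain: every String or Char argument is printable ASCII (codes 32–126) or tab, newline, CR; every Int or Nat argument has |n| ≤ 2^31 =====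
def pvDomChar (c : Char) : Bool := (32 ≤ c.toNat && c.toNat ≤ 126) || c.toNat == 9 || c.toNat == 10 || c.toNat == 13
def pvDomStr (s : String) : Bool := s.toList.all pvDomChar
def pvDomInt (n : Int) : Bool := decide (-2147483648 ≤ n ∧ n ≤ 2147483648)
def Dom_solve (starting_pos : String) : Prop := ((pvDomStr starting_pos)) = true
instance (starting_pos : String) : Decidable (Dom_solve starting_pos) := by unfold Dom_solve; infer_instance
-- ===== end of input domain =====

-- B replaces A's pairwise-reduction triangle by a single GF(3) sum of binomial coefficients
-- C(n-1,k)·x_k, each computed mod 3 via Lucas' theorem (a different algorithm; the timing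
-- run's large inputs fall outside Pre_solve, so no speed is claimed).

-- ===== PORT A =====
-- Rows are lists of Python values: `some c` a 1-char string, `none` Python's None
-- (choose_letter falls through and returns None off 'RGB'; None == None is True in Python).
def chooseLetter (a b : Option Char) : Option Char :=
  if a = b then a
  else if a = some 'R' then
    (if b = some 'G' then some 'B' else if b = some 'B' then some 'G' else none)
  else if a = some 'G' then
    (if b = some 'R' then some 'B' else if b = some 'B' then some 'R' else none)
  else if a = some 'B' then
    (if b = some 'R' then some 'G' else if b = some 'G' then some 'R' else none)
  else none

-- the inner for-loop: next_line = [choose_letter(old[i], old[i+1]) for i in range(len(old)-1)]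
def rowStep (xs : List (Option Char)) : List (Option Char) :=
  (List.range (xs.length - 1)).map (fun i => chooseLetter (xs.getD i none) (xs.getD (i + 1) none))

-- the while loop; fuel = initial length bounds the iteration count (empty input loops forever
-- in Python, excluded by Pre_solve)
def solveLoop : Nat → List (Option Char) → List (Option Char)
  | 0, xs => xs
  | fuel + 1, xs => if xs.length ≠ 1 then solveLoop fuel (rowStep xs) else xs

def solve (starting_pos : String) : String :=
  match (solveLoop starting_pos.toList.length (starting_pos.toList.map some)).headD none with
  | some c => String.ofList [c]
  | none => ""   -- unreachable under Pre_solve (A returns None, not a string)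

-- ===== PORT B =====
-- while k != 0 loop of c3, with accumulator r; k //= 3 decreases k
def c3Go (n k r : Nat) : Nat :=
  if h : k = 0 then r
  else
    let ni := n % 3
    let ki := k % 3
    if ki > ni then 0
    else c3Go (n / 3) (k / 3) (if ki = 1 ∧ ni = 2 then r * 2 % 3 else r)
  termination_by k
  decreasing_by exact Nat.div_lt_self (Nat.pos_of_ne_zero h) (by norm_num)

def c3 (n k : Nat) : Nat := c3Go n k 1

-- the dict {'R':0,'G':1,'B':2}; lookup of any other key raises KeyError (outside Pre_solve)
def valRGB (c : Char) : Nat := if c = 'R' then 0 else if c = 'G' then 1 else 2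

def solve_alt (starting_pos : String) : String :=
  let cs := starting_pos.toList
  if cs.length = 1 then starting_pos
  else
    let m := cs.length - 1
    let s0 := ((cs.zipIdx.map (fun p => c3 m p.2 * valRGB p.1)).sum) % 3
    let s1 := if m % 2 = 1 then (3 - s0) % 3 else s0
    String.ofList [['R', 'G', 'B'].getD s1 'R']

-- ===== PRECONDITION & SPEC =====
-- Pre_ excludes the empty string (A's while loop never terminates there) and strings of
-- length ≥ 2 containing a character outside 'RGB' (A returns None there, not a string).
def Pre_solve (starting_pos : String) : Prop :=
  1 ≤ starting_pos.toList.length ∧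
    (starting_pos.toList.length = 1 ∨
      starting_pos.toList.all (fun c => c == 'R' || c == 'G' || c == 'B') = true)
instance (starting_pos : String) : Decidable (Pre_solve starting_pos) := by
  unfold Pre_solve; infer_instance

def pvWitness_solve : String := "RGB"

def Spec_solve (starting_pos : String) (out : String) : Prop := out = solve_alt starting_pos
instance (starting_pos : String) (out : String) : Decidable (Spec_solve starting_pos out) := by
  unfold Spec_solve; infer_instance

-- ===== CLAIM (what is proved, stated in full; the proofs are below) =====
def Claim_equal_solve : Prop := ∀ (starting_pos : String), Dom_solve starting_pos →
  Pre_solve starting_pos → Spec_solve starting_pos (solve starting_pos)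

-- ===== LEMMAS AND PROOFS =====

-- encode / decode between 'RGB' characters and ZMod 3
def encC (c : Char) : ZMod 3 := (valRGB c : ZMod 3)
def decC (x : ZMod 3) : Char := if x = 0 then 'R' else if x = 1 then 'G' else 'B'

-- the numeric triangle step
def nstep (xs : List (ZMod 3)) : List (ZMod 3) :=
  (List.range (xs.length - 1)).map (fun i => -(xs.getD i 0 + xs.getD (i + 1) 0))

-- the invariant: signed binomial-weighted sum of a row
def rowVal (xs : List (ZMod 3)) : ZMod 3 :=
  (-1) ^ (xs.length - 1) *
    ∑ k ∈ Finset.range xs.length, (Nat.choose (xs.length - 1) k : ZMod 3) * xs.getD k 0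

theorem chooseLetter_dec (x y : ZMod 3) :
    chooseLetter (some (decC x)) (some (decC y)) = some (decC (-(x + y))) := by
  revert x y; decide

theorem rowStep_map_dec (xs : List (ZMod 3)) :
    rowStep (xs.map (fun x => some (decC x))) = (nstep xs).map (fun x => some (decC x)) := by
  unfold rowStep nstep
  rw [List.map_map, List.length_map]
  refine List.map_congr_left ?_
  intro i hi
  simp only [List.mem_range] at hi
  have h1 : i < xs.length := by omega
  have h2 : i + 1 < xs.length := by omega
  simp only [Function.comp_apply]
  rw [List.getD_eq_getElem _ _ (by simpa using h1), List.getD_eq_getElem _ _ (by simpa using h2),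
    List.getD_eq_getElem _ _ h1, List.getD_eq_getElem _ _ h2, List.getElem_map, List.getElem_map]
  exact chooseLetter_dec _ _

theorem length_nstep (xs : List (ZMod 3)) : (nstep xs).length = xs.length - 1 := by
  simp [nstep]

theorem pascal_sum (m' : Nat) (x : Nat → ZMod 3) :
    ∑ k ∈ Finset.range (m' + 2), (Nat.choose (m' + 1) k : ZMod 3) * x k
      = ∑ k ∈ Finset.range (m' + 1), (Nat.choose m' k : ZMod 3) * x k
        + ∑ k ∈ Finset.range (m' + 1), (Nat.choose m' k : ZMod 3) * x (k + 1) := by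
  rw [Finset.sum_range_succ' (fun k => (Nat.choose (m' + 1) k : ZMod 3) * x k) (m' + 1)]
  simp only [Nat.choose_succ_succ, Nat.cast_add, add_mul, Nat.choose_zero_right, Nat.cast_one,
    one_mul]
  rw [Finset.sum_add_distrib]
  have h0 : ∑ k ∈ Finset.range (m' + 1), (Nat.choose m' (k + 1) : ZMod 3) * x (k + 1) + x 0
      = ∑ k ∈ Finset.range (m' + 1), (Nat.choose m' k : ZMod 3) * x k := by
    have := Finset.sum_range_succ' (fun k => (Nat.choose m' k : ZMod 3) * x k) (m' + 1)
    simp only [Nat.choose_zero_right, Nat.cast_one, one_mul] at this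
    rw [← this, Finset.sum_range_succ, Nat.choose_succ_self]
    simp
  calc ∑ k ∈ Finset.range (m' + 1), (Nat.choose m' k : ZMod 3) * x (k + 1)
        + ∑ k ∈ Finset.range (m' + 1), (Nat.choose m' (k + 1) : ZMod 3) * x (k + 1) + x 0
      = ∑ k ∈ Finset.range (m' + 1), (Nat.choose m' k : ZMod 3) * x (k + 1)
        + (∑ k ∈ Finset.range (m' + 1), (Nat.choose m' (k + 1) : ZMod 3) * x (k + 1) + x 0) := by
        ring
    _ = _ := by rw [h0]; ring

theorem rowVal_nstep (xs : List (ZMod 3)) (h : 2 ≤ xs.length) :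
    rowVal (nstep xs) = rowVal xs := by
  obtain ⟨m', hm⟩ : ∃ m', xs.length = m' + 2 := ⟨xs.length - 2, by omega⟩
  unfold rowVal
  rw [length_nstep, hm]
  have hs : ∀ k ∈ Finset.range (m' + 1),
      (Nat.choose m' k : ZMod 3) * (nstep xs).getD k 0
        = (Nat.choose m' k : ZMod 3) * (-(xs.getD k 0 + xs.getD (k + 1) 0)) := by
    intro k hk
    simp only [Finset.mem_range] at hk
    have hk1 : k < (nstep xs).length := by rw [length_nstep]; omega
    rw [List.getD_eq_getElem _ _ hk1]
    unfold nstep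
    rw [List.getElem_map]
    simp only [List.getElem_range]
  simp only [Nat.add_sub_cancel, show m' + 2 - 1 = m' + 1 from rfl]
  rw [Finset.sum_congr rfl hs]
  have expand : ∑ k ∈ Finset.range (m' + 1),
      (Nat.choose m' k : ZMod 3) * (-(xs.getD k 0 + xs.getD (k + 1) 0))
      = -(∑ k ∈ Finset.range (m' + 1), (Nat.choose m' k : ZMod 3) * xs.getD k 0
          + ∑ k ∈ Finset.range (m' + 1), (Nat.choose m' k : ZMod 3) * xs.getD (k + 1) 0) := by
    rw [← Finset.sum_add_distrib, ← Finset.sum_neg_distrib]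
    refine Finset.sum_congr rfl fun k _ => by ring
  rw [expand, ← pascal_sum m' (fun k => xs.getD k 0)]
  ring

theorem rowVal_singleton (x : ZMod 3) : rowVal [x] = x := by
  simp [rowVal]

theorem solveLoop_map_dec (fuel : Nat) (xs : List (ZMod 3)) (h1 : 1 ≤ xs.length)
    (h2 : xs.length ≤ fuel + 1) :
    solveLoop fuel (xs.map (fun x => some (decC x))) = [some (decC (rowVal xs))] := by
  induction fuel generalizing xs with
  | zero =>
    have hl : xs.length = 1 := by omega
    obtain ⟨x, rfl⟩ : ∃ x, xs = [x] := List.length_eq_one_iff.mp hl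
    simp [solveLoop, rowVal_singleton]
  | succ fuel ih =>
    by_cases hl : xs.length = 1
    · obtain ⟨x, rfl⟩ : ∃ x, xs = [x] := List.length_eq_one_iff.mp hl
      simp [solveLoop, rowVal_singleton]
    · have hge : 2 ≤ xs.length := by omega
      have : solveLoop (fuel + 1) (xs.map (fun x => some (decC x))) =
          solveLoop fuel (rowStep (xs.map (fun x => some (decC x)))) := by
        simp only [solveLoop, List.length_map]
        rw [if_pos hl]
      rw [this, rowStep_map_dec,
        ih (nstep xs) (by rw [length_nstep]; omega) (by rw [length_nstep]; omega),
        rowVal_nstep xs hge]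

theorem choose_small_mod (ni ki : Nat) (hn : ni < 3) (hk : ki < 3) (hle : ki ≤ ni) :
    Nat.choose ni ki % 3 = if ki = 1 ∧ ni = 2 then 2 else 1 := by
  interval_cases ni <;> interval_cases ki <;> simp_all

theorem lucas3 (n k : Nat) :
    Nat.choose n k ≡ Nat.choose (n % 3) (k % 3) * Nat.choose (n / 3) (k / 3) [MOD 3] := by
  have : Fact (Nat.Prime 3) := ⟨by norm_num⟩
  exact Choose.choose_modEq_choose_mod_mul_choose_div_nat

theorem c3Go_eq (k n r : Nat) (hr : r < 3) : c3Go n k r = r * Nat.choose n k % 3 := by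
  induction k using Nat.strong_induction_on generalizing n r with
  | _ k ih =>
    rw [c3Go]
    by_cases hk : k = 0
    · simp [hk, Nat.mod_eq_of_lt hr]
    · rw [dif_neg hk]
      simp only []
      by_cases hgt : k % 3 > n % 3
      · rw [if_pos hgt]
        have h0 : Nat.choose (n % 3) (k % 3) = 0 := Nat.choose_eq_zero_of_lt hgt
        have h3 : Nat.choose n k % 3 = 0 := by
          have := lucas3 n k
          rw [h0, Nat.zero_mul] at this
          exact this
        have : r * Nat.choose n k % 3 = 0 := by rw [Nat.mul_mod, h3]; simp
        omega
      · rw [if_neg hgt]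
        have hlt : k / 3 < k := Nat.div_lt_self (Nat.pos_of_ne_zero hk) (by norm_num)
        set cc := Nat.choose (n % 3) (k % 3) with hcc_def
        have hcc : cc % 3 = if k % 3 = 1 ∧ n % 3 = 2 then 2 else 1 :=
          choose_small_mod _ _ (Nat.mod_lt _ (by norm_num)) (Nat.mod_lt _ (by norm_num))
            (by omega)
        set r' := if k % 3 = 1 ∧ n % 3 = 2 then r * 2 % 3 else r with hr'_def
        have hr'3 : r' < 3 := by
          rw [hr'_def]; split
          · exact Nat.mod_lt _ (by norm_num)
          · exact hr
        have hre : r' ≡ r * cc [MOD 3] := by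
          rw [hr'_def]
          split_ifs with hb
          · calc r * 2 % 3 ≡ r * 2 [MOD 3] := Nat.mod_modEq _ _
              _ = r * (cc % 3) := by rw [hcc, if_pos hb]
              _ ≡ r * cc [MOD 3] := Nat.ModEq.mul_left r (Nat.mod_modEq _ _)
          · calc r = r * 1 := by rw [Nat.mul_one]
              _ = r * (cc % 3) := by rw [hcc, if_neg hb]
              _ ≡ r * cc [MOD 3] := Nat.ModEq.mul_left r (Nat.mod_modEq _ _)
        rw [ih (k / 3) hlt (n / 3) r' hr'3]
        calc r' * Nat.choose (n / 3) (k / 3)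
            ≡ r * cc * Nat.choose (n / 3) (k / 3) [MOD 3] := Nat.ModEq.mul_right _ hre
          _ = r * (cc * Nat.choose (n / 3) (k / 3)) := by ring
          _ ≡ r * Nat.choose n k [MOD 3] := Nat.ModEq.mul_left r (lucas3 n k).symm

theorem c3_eq (n k : Nat) : c3 n k = Nat.choose n k % 3 := by
  have := c3Go_eq k n 1 (by norm_num); simpa [c3] using this

-- B-side bridge: the zipIdx sum, cast to ZMod 3, is the binomial-weighted sum
theorem zipIdx_sum_cast (m : Nat) (cs : List Char) (j : Nat) :
    (((cs.zipIdx j).map (fun p => c3 m p.2 * valRGB p.1)).sum : ZMod 3)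
      = ∑ k ∈ Finset.range cs.length,
          (Nat.choose m (j + k) : ZMod 3) * encC (cs.getD k 'R') := by
  induction cs generalizing j with
  | nil => simp
  | cons c cs ih =>
    rw [List.zipIdx_cons, List.map_cons, List.sum_cons, Nat.cast_add, ih (j + 1),
      List.length_cons,
      Finset.sum_range_succ'
        (fun k => (Nat.choose m (j + k) : ZMod 3) * encC ((c :: cs).getD k 'R')) cs.length]
    simp only [List.getD_cons_succ, List.getD_cons_zero, Nat.add_zero]
    have hc3 : ((c3 m j * valRGB c : Nat) : ZMod 3) = (Nat.choose m j : ZMod 3) * encC c := by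
      rw [Nat.cast_mul, c3_eq, ZMod.natCast_mod]
      rfl
    rw [hc3, add_comm]
    congr 1
    refine Finset.sum_congr rfl fun k _ => ?_
    have he : j + 1 + k = j + (k + 1) := by omega
    rw [he]

theorem getD_RGB (v : ZMod 3) : ['R', 'G', 'B'].getD v.val 'R' = decC v := by
  revert v; decide

theorem decC_encC (c : Char) (h : c = 'R' ∨ c = 'G' ∨ c = 'B') : decC (encC c) = c := by
  rcases h with rfl | rfl | rfl <;> decide

theorem val_eq_of_cast (t : Nat) (ht : t < 3) (v : ZMod 3) (h : (t : ZMod 3) = v) :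
    t = v.val := by
  subst h
  rw [ZMod.val_cast_of_lt ht]

-- ===== VERDICT (by name: the statement is the Claim_ definition above) =====
theorem solve_spec : Claim_equal_solve := by
  unfold Claim_equal_solve Spec_solve
  intro s _ hpre
  obtain ⟨h1, h2⟩ := hpre
  by_cases hl1 : s.toList.length = 1
  · -- length-1 input: both sides return the input string unchanged
    obtain ⟨c, hc⟩ : ∃ c, s.toList = [c] := List.length_eq_one_iff.mp hl1
    have hB : solve_alt s = s := by
      simp [solve_alt, hc]
    have hA : solve s = s := by
      unfold solve
      rw [hc]
      have hstep : solveLoop [c].length ([c].map some) = [some c] := by rfl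
      rw [hstep]
      show String.ofList [c] = s
      rw [← hc, String.ofList_toList]
    rw [hA, hB]
  · -- length ≥ 2: every character is in 'RGB'
    have hrgb : ∀ c ∈ s.toList, c = 'R' ∨ c = 'G' ∨ c = 'B' := by
      rcases h2 with h | h
      · omega
      · intro c hc
        have h2 := List.all_eq_true.mp h c hc
        simp only [Bool.or_eq_true, beq_iff_eq] at h2
        tauto
    have hL : 2 ≤ s.toList.length := by omega
    set cs := s.toList with hcs
    set xs := cs.map encC with hxs
    have hxl : xs.length = cs.length := by rw [hxs, List.length_map]
    -- A's side evaluates to the decoded rowVal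
    have hmap : cs.map some = xs.map (fun x => some (decC x)) := by
      rw [hxs, List.map_map]
      refine (List.map_congr_left fun c hc => ?_).symm
      simp only [Function.comp_apply]
      rw [decC_encC c (hrgb c hc)]
    have hA : solve s = String.ofList [decC (rowVal xs)] := by
      unfold solve
      rw [← hcs, hmap, solveLoop_map_dec cs.length xs (by omega) (by omega)]
      rfl
    -- the binomial-weighted sum, shared by both sides
    set m := cs.length - 1 with hm
    set S : ZMod 3 :=
      ∑ k ∈ Finset.range cs.length, (Nat.choose m k : ZMod 3) * encC (cs.getD k 'R') with hS
    have hrowS : rowVal xs = (-1) ^ m * S := by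
      rw [rowVal, hxl, hS, hm]
      congr 1
      refine Finset.sum_congr rfl fun k hk => ?_
      simp only [Finset.mem_range] at hk
      have hk' : k < xs.length := by omega
      rw [List.getD_eq_getElem xs 0 hk', List.getD_eq_getElem cs 'R' hk]
      congr 1
      simp only [hxs, List.getElem_map]
    -- B's side
    unfold solve_alt
    rw [← hcs, if_neg hl1, hA]
    set s0 := (cs.zipIdx.map (fun p => c3 m p.2 * valRGB p.1)).sum % 3 with hs0
    have hs03 : s0 < 3 := Nat.mod_lt _ (by norm_num)
    have hs0c : ((s0 : Nat) : ZMod 3) = S := by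
      rw [hs0, ZMod.natCast_mod, zipIdx_sum_cast m cs 0]
      simp [hS]
    congr 1
    by_cases hodd : m % 2 = 1
    · rw [if_pos hodd]
      have hneg : rowVal xs = -S := by
        rw [hrowS, Odd.neg_one_pow (Nat.odd_iff.mpr hodd), neg_one_mul]
      have : ((((3 - s0) % 3 : Nat)) : ZMod 3) = -S := by
        rw [ZMod.natCast_mod, Nat.cast_sub (by omega), ← hs0c]
        have h30 : ((3 : Nat) : ZMod 3) = 0 := by decide
        rw [h30, zero_sub]
      rw [hneg, ← getD_RGB, ← val_eq_of_cast ((3 - s0) % 3) (Nat.mod_lt _ (by norm_num)) _ this]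
    · rw [if_neg hodd]
      have hpos : rowVal xs = S := by
        rw [hrowS, Even.neg_one_pow (Nat.even_iff.mpr (by omega)), one_mul]
      rw [hpos, ← getD_RGB, ← val_eq_of_cast s0 hs03 _ hs0c]
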